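-- pv_equiv track=rewrite | github.com/solsteve/Calisto-trncmp | scripts/CardShuffle.py | decRunLength
-- ===== SOURCE A (Python) =====
-- def decSubSeq( list ):
--     #/ ----------------------------------------------------------------------
--     n = len(list)
--     count = 1;
--     prev  = list[0]
--     i = 1
--     while (i < n ):
--         x = list[i]
--         if ( 1 == (prev - x) ):
--             count += 1
--             i     += 1
--             prev   = x
--         else:
--             return (count,i)
--     return (count,None)
--
-- def decRunLength( list ):
--     #/ ----------------------------------------------------------------------
--     sub = []
--     idx = 0
--     while( True ):
--         c, n =  decSubSeq(list[idx:])
--         sub.append(c)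
--         if ( None == n ):
--             return sub
--         idx += n
-- ===== SOURCE B (Python) =====
-- def decRunLength(list):
--     # Single linear scan: count the current decrement-by-1 run, emit on break.
--     runs = []
--     count = 1
--     for prev, x in zip(list, list[1:]):
--         if prev - x == 1:
--             count += 1
--         else:
--             runs.append(count)
--             count = 1
--     runs.append(count)
--     return runs
-- ===== Notes on version B (the rewrite author's own statement) =====
-- stated objective: faster
-- what changed: Replaces the repeated list[idx:] slicing with restarting decSubSeq scans by one linear pass over adjacent pairs that tracks the current run length and appends it on each break.
import Mathlib
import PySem

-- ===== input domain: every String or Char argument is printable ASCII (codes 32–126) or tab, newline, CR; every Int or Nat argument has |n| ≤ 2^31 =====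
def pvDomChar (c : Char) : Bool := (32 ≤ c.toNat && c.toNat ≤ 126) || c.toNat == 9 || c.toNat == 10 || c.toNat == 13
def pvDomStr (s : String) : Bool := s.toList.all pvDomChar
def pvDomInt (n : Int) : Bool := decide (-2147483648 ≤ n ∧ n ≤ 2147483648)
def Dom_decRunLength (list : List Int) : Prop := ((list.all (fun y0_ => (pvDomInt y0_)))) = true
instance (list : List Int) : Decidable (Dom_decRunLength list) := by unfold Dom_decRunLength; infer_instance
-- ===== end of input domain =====

-- B replaces A's quadratic slice-and-rescan loop by one linear pass over adjacent
-- pairs tracking the current run length (objective: faster, asymptotic).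


-- ===== PORT A =====
-- decSubSeq's while loop: prev/count/i are exactly Python's loop state.
def decSubSeqLoop (prev count i : Int) (rest : List Int) : Int × Option Int :=
  match rest with
  | [] => (count, none)
  | x :: xs =>
    if prev - x = 1 then decSubSeqLoop x (count + 1) (i + 1) xs
    else (count, some i)

-- decSubSeq: list[0] raises IndexError on []; that input never reaches this port
-- under Pre_ (and the recursive calls below are always on nonempty suffixes).
def decSubSeq (l : List Int) : Int × Option Int :=
  match l with
  | [] => (1, none)
  | p :: rest => decSubSeqLoop p 1 1 rest

-- the break index returned is ≥ the starting index (needed for termination)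
theorem decSubSeqLoop_some_le (rest : List Int) : ∀ (prev count i c k : Int),
    decSubSeqLoop prev count i rest = (c, some k) → i ≤ k := by
  induction rest with
  | nil => intro prev count i c k h; simp [decSubSeqLoop] at h
  | cons x xs ih =>
    intro prev count i c k h
    simp only [decSubSeqLoop] at h
    split at h
    · have := ih x (count + 1) (i + 1) c k h; omega
    · simp at h; omega

-- decRunLength's while-True loop; sub is Python's accumulator, and since the
-- consumed index n is always ≥ 1, list[idx:] is exactly l.drop n.toNat here.
def decRunAux (sub : List Int) (l : List Int) : List Int :=
  match h : decSubSeq l with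
  | (c, none) => sub ++ [c]
  | (c, some k) => decRunAux (sub ++ [c]) (l.drop k.toNat)
termination_by l.length
decreasing_by
  cases l with
  | nil => simp [decSubSeq] at h
  | cons p rest =>
    have hk : (1 : Int) ≤ k := decSubSeqLoop_some_le rest p 1 1 c k (by simpa [decSubSeq] using h)
    simp only [List.length_drop, List.length_cons]
    omega

def decRunLength (list : List Int) : List Int := decRunAux [] list

-- ===== PORT B =====
-- the for-loop of Source B over zip(list, list[1:]): runs/count are its state
def altLoop (runs : List Int) (count : Int) (pairs : List (Int × Int)) : List Int :=
  match pairs with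
  | [] => runs ++ [count]
  | (prev, x) :: ps =>
    if prev - x = 1 then altLoop runs (count + 1) ps
    else altLoop (runs ++ [count]) 1 ps

def decRunLength_alt (list : List Int) : List Int :=
  altLoop [] 1 (list.zip list.tail)

-- ===== PRECONDITION & SPEC =====
-- Pre_ excludes only the empty list, on which A raises IndexError (list[0]).
def Pre_decRunLength (list : List Int) : Prop := list ≠ []
instance (list : List Int) : Decidable (Pre_decRunLength list) := by unfold Pre_decRunLength; infer_instance
def pvWitness_decRunLength : List Int := [5, 4, 3, 7, 6, 2]

def Spec_decRunLength (list : List Int) (out : List Int) : Prop := out = decRunLength_alt list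
instance (list : List Int) (out : List Int) : Decidable (Spec_decRunLength list out) := by unfold Spec_decRunLength; infer_instance

-- ===== CLAIM (what is proved, stated in full; the proofs are below) =====
def Claim_equal_decRunLength : Prop := ∀ (list : List Int), Dom_decRunLength list → Pre_decRunLength list → Spec_decRunLength list (decRunLength list)

-- ===== LEMMAS AND PROOFS =====

-- reference recursion both ports are reduced to
def runsAux (prev c : Int) (rest : List Int) : List Int :=
  match rest with
  | [] => [c]
  | x :: xs => if prev - x = 1 then runsAux x (c + 1) xs else c :: runsAux x 1 xs

theorem decSubSeqLoop_none (rest : List Int) : ∀ (prev c i c' : Int),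
    decSubSeqLoop prev c i rest = (c', none) → runsAux prev c rest = [c'] := by
  induction rest with
  | nil => intro prev c i c' h; simp [decSubSeqLoop] at h; simp [runsAux, h]
  | cons x xs ih =>
    intro prev c i c' h
    simp only [decSubSeqLoop] at h
    split at h
    · next hp => simp [runsAux, hp]; exact ih x (c + 1) (i + 1) c' h
    · simp at h

theorem decSubSeqLoop_some (rest : List Int) : ∀ (prev c i c' k : Int),
    decSubSeqLoop prev c i rest = (c', some k) →
    ∃ x xs, rest.drop (k - i).toNat = x :: xs ∧ runsAux prev c rest = c' :: runsAux x 1 xs := by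
  induction rest with
  | nil => intro prev c i c' k h; simp [decSubSeqLoop] at h
  | cons x xs ih =>
    intro prev c i c' k h
    simp only [decSubSeqLoop] at h
    split at h
    · next hp =>
      obtain ⟨y, ys, hd, hr⟩ := ih x (c + 1) (i + 1) c' k h
      have hk : i + 1 ≤ k := decSubSeqLoop_some_le xs x (c + 1) (i + 1) c' k h
      refine ⟨y, ys, ?_, ?_⟩
      · have : (k - i).toNat = (k - (i + 1)).toNat + 1 := by omega
        simpa [this] using hd
      · simp [runsAux, hp, hr]
    · next hp =>
      simp at h
      obtain ⟨hc, hk⟩ := h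
      refine ⟨x, xs, ?_, ?_⟩
      · have : (k - i).toNat = 0 := by omega
        simp [this]
      · simp [runsAux, hp, hc]

theorem decRunAux_eq : ∀ (n : ℕ) (l : List Int), l.length ≤ n → ∀ (sub : List Int) (p : Int) (rest : List Int),
    l = p :: rest → decRunAux sub l = sub ++ runsAux p 1 rest := by
  intro n
  induction n with
  | zero => intro l hl sub p rest hc; subst hc; simp at hl
  | succ m ih =>
    intro l hl sub p rest hc
    subst hc
    unfold decRunAux
    split
    · next c h =>
      have := decSubSeqLoop_none rest p 1 1 c (by simpa [decSubSeq] using h)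
      simp [this]
    · next c k h =>
      have hs : decSubSeqLoop p 1 1 rest = (c, some k) := by simpa [decSubSeq] using h
      have hk : (1 : Int) ≤ k := decSubSeqLoop_some_le rest p 1 1 c k hs
      obtain ⟨x, xs, hd, hr⟩ := decSubSeqLoop_some rest p 1 1 c k hs
      have hdrop : (p :: rest).drop k.toNat = x :: xs := by
        have h1 : k.toNat = (k - 1).toNat + 1 := by omega
        rw [h1]
        simpa using hd
      have hlen : (x :: xs).length ≤ m := by
        have h2 := congrArg List.length hdrop
        simp [List.length_drop] at h2
        simp at hl ⊢
        omega
      rw [hdrop, ih (x :: xs) hlen (sub ++ [c]) x xs rfl, hr]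
      simp

theorem altLoop_eq : ∀ (xs : List Int) (prev c : Int) (runs : List Int),
    altLoop runs c ((prev :: xs).zip xs) = runs ++ runsAux prev c xs := by
  intro xs
  induction xs with
  | nil => intro prev c runs; simp [altLoop, runsAux]
  | cons x xs' ih =>
    intro prev c runs
    simp only [List.zip_cons_cons, altLoop, runsAux]
    split
    · exact ih x (c + 1) runs
    · rw [ih x 1 (runs ++ [c])]; simp

-- ===== VERDICT (by name: the statement is the Claim_ definition above) =====
theorem decRunLength_spec : Claim_equal_decRunLength := by
  intro list _ hpre
  unfold Spec_decRunLength decRunLength decRunLength_alt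
  cases list with
  | nil => exact absurd rfl hpre
  | cons p rest =>
    rw [decRunAux_eq (p :: rest).length (p :: rest) le_rfl [] p rest rfl]
    simp [altLoop_eq rest p 1 []]
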